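-- pv_equiv track=rewrite | github.com/aniaodoj66/WDI | zbiór zadań/zad67.py | dzialanie
-- ===== SOURCE A (Python) =====
-- def dzielenie(x, y, n):
--     t = [0 for _ in range(n + 1)]
--     for i in range(len(t)):
--         cc = x // y
--         t[i] = cc
--         od = cc * y
--         x = (x - od) * 10
--     return t
--
-- def silnia(x):
--     y = 1
--     for i in range(1, x + 1):
--         y *= i
--     return y
--
-- def dzialanie(ilosc, n):
--     suma = [0 for _ in range(n)]
--     for i in range(0, ilosc + 1):
--         terazniejsza = dzielenie(1, silnia(i), n)
--         for j in range(len(suma)-1, -1, -1):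
--             suma[j] += terazniejsza[j]
--             if j != 0 and suma[j] >= 10:
--                 suma[j - 1] += 1
--                 suma[j] = suma[j] % 10
--     return suma
-- ===== SOURCE B (Python) =====
-- def dzialanie(ilosc, n):
--     cols = [0] * n
--     f = 1
--     for i in range(ilosc + 1):
--         if i > 1:
--             f *= i
--         r = 1
--         for j in range(n):
--             q, r = divmod(r, f)
--             cols[j] += q
--             r *= 10
--     carry = 0
--     for j in range(n - 1, 0, -1):
--         carry, cols[j] = divmod(cols[j] + carry, 10)
--     if n > 0:
--         cols[0] += carry
--     return cols
-- ===== Notes on version B (the rewrite author's own statement) =====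
-- stated objective: faster
-- what changed: B keeps one running factorial instead of recomputing silnia from scratch for every term, fuses each term's long division directly into per-position column sums (no per-term digit list, no per-term carry loop), and normalizes the columns with a single right-to-left carry pass at the end.
import Mathlib
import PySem

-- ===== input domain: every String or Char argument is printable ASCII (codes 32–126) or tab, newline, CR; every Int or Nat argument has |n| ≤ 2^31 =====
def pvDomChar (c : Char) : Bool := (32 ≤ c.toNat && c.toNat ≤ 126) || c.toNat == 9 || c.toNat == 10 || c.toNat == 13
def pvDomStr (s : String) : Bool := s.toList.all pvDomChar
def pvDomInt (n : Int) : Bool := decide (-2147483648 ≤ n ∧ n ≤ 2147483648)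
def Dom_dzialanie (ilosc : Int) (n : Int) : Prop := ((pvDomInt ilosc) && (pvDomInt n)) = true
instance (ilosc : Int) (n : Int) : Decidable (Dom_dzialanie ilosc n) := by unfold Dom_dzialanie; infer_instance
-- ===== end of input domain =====

-- B keeps a running factorial instead of recomputing silnia per term, fuses each term's long
-- division into per-position column sums and normalizes with one final carry pass (objective: faster).

-- ===== PORT A =====
def dzielenie (x : Int) (y : Int) (n : Int) : List Int :=
  let t : List Int := (PySem.List.pyRange 0 (n+1) 1).map (fun _ => 0)
  let r := (PySem.List.pyRange 0 (PySem.List.len t) 1).foldl (fun (st : Int × List Int) i =>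
    let cc := PySem.Int.floordiv st.1 y
    let t := PySem.List.pySetD st.2 i cc
    let od := cc * y
    ((st.1 - od) * 10, t)) (x, t)
  r.2

def silnia (x : Int) : Int :=
  (PySem.List.pyRange 1 (x+1) 1).foldl (fun y i => y * i) 1

def dzialanie (ilosc : Int) (n : Int) : List Int :=
  let suma : List Int := (PySem.List.pyRange 0 n 1).map (fun _ => 0)
  (PySem.List.pyRange 0 (ilosc+1) 1).foldl (fun suma i =>
    let terazniejsza := dzielenie 1 (silnia i) n
    (PySem.List.pyRange (PySem.List.len suma - 1) (-1) (-1)).foldl (fun suma j =>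
      let suma := PySem.List.pySetD suma j (PySem.List.pyGetD suma j 0 + PySem.List.pyGetD terazniejsza j 0)
      if j ≠ 0 ∧ PySem.List.pyGetD suma j 0 ≥ 10 then
        let suma := PySem.List.pySetD suma (j-1) (PySem.List.pyGetD suma (j-1) 0 + 1)
        PySem.List.pySetD suma j (PySem.Int.mod (PySem.List.pyGetD suma j 0) 10)
      else suma) suma) suma

-- ===== PORT B =====
def dzialanie_alt (ilosc : Int) (n : Int) : List Int :=
  let cols : List Int := List.replicate n.toNat 0
  let fc := (PySem.List.pyRange 0 (ilosc+1) 1).foldl (fun (st : Int × List Int) i =>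
      let f := if i > 1 then st.1 * i else st.1
      let rc := (PySem.List.pyRange 0 n 1).foldl (fun (rc : Int × List Int) j =>
          let q := PySem.Int.floordiv rc.1 f
          let r := PySem.Int.mod rc.1 f
          let cols := PySem.List.pySetD rc.2 j (PySem.List.pyGetD rc.2 j 0 + q)
          (r * 10, cols)) (1, st.2)
      (f, rc.2)) (1, cols)
  let cp := (PySem.List.pyRange (n-1) 0 (-1)).foldl (fun (cc : Int × List Int) j =>
      let s := PySem.List.pyGetD cc.2 j 0 + cc.1
      (PySem.Int.floordiv s 10, PySem.List.pySetD cc.2 j (PySem.Int.mod s 10))) (0, fc.2)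
  if n > 0 then PySem.List.pySetD cp.2 0 (PySem.List.pyGetD cp.2 0 0 + cp.1) else cp.2

-- ===== PRECONDITION & SPEC =====
def Spec_dzialanie (ilosc : Int) (n : Int) (out : List Int) : Prop := out = dzialanie_alt ilosc n
instance (ilosc : Int) (n : Int) (out : List Int) : Decidable (Spec_dzialanie ilosc n out) := by unfold Spec_dzialanie; infer_instance

-- ===== CLAIM (what is proved, stated in full; the proofs are below) =====
def Claim_equal_dzialanie : Prop := ∀ (ilosc : Int) (n : Int), Dom_dzialanie ilosc n → Spec_dzialanie ilosc n (dzialanie ilosc n)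

-- ===== LEMMAS AND PROOFS =====

-- k-th entry (k = 0 is the integer part) of the length-(N+1) decimal representation of S
def pvDigit (S : Int) (N k : Nat) : Int := if k = 0 then S / 10^N else S / 10^(N-k) % 10
def pvRepr (S : Int) (N : Nat) : List Int := (List.range (N+1)).map (pvDigit S N)
-- m-th digit of the long division 1/f
def pvDig (f : Int) (m : Nat) : Int := if m = 0 then 1 / f else 10^m / f - 10 * (10^(m-1) / f)
def pvFact : Nat → Int
  | 0 => 1
  | (m+1) => pvFact (m) * ((m : Int)+1)
def pvPS (N : Nat) : Nat → Int
  | 0 => 0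
  | (M+1) => pvPS N M + 10^N / pvFact M
-- running value after pouring the k lowest digit contributions into S
def pvR (S : Int) (d : Nat → Int) (N : Nat) : Nat → Int
  | 0 => S
  | (k+1) => pvR S d N k + d (N - k) * 10^k
-- pending carry into position j just before the inner loop processes index j
def pvC (S : Int) (d : Nat → Int) (N j : Nat) : Int :=
  pvR S d N (N-j) / 10^(N-j) - S / 10^(N-j)
-- inner-loop state just before processing index j (indices N..j+1 already done)
def pvState (S : Int) (d : Nat → Int) (N j : Nat) : List Int :=
  (List.range (N+1)).map (fun k =>
    if k < j then pvDigit S N k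
    else if k = j then pvDigit S N j + pvC S d N j
    else pvDigit (pvR S d N (N+1)) N k)

lemma set_map_range {β : Type} (f : Nat → β) (m k : Nat) (v : β) (hk : k < m) :
    ((List.range m).map f).set k v = (List.range m).map (fun i => if i = k then v else f i) := by
  apply List.ext_getElem (by simp)
  intro i h1 h2
  have him : i < m := by simpa using h2
  by_cases hik : i = k
  · simp [List.getElem_set, hik, hk, him]
  · simp [List.getElem_set, hik]
    exact fun h => absurd h.symm hik

lemma pvFact_pos (M : Nat) : 0 < pvFact M := by
  induction M with
  | zero => simp [pvFact]
  | succ m ih => have : (0:Int) < (m:Int) + 1 := by omega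
                 simpa [pvFact] using mul_pos ih this

lemma silnia_eq (M : Nat) : silnia (M : Int) = pvFact M := by
  induction M with
  | zero => simp [silnia, pvFact, PySem.List.pyRange_one_eq_nil]
  | succ m ih =>
    have h : ((m:Int)+1) + 1 = ((m+1 : Nat) : Int) + 1 := by push_cast; ring
    have hr : PySem.List.pyRange 1 (((m+1 : Nat) : Int) + 1) 1
        = PySem.List.pyRange 1 ((m:Int)+1) 1 ++ [(m:Int)+1] := by
      rw [← h]; exact PySem.List.pyRange_one_succ_right (by omega)
    simp only [silnia] at ih ⊢
    rw [hr, List.foldl_append, ih]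
    simp [pvFact]

lemma pvDig_eq (f : Int) (hf : 0 < f) (m : Nat) (hm : 1 ≤ m) :
    pvDig f m = (10^(m-1) % f) * 10 / f := by
  obtain ⟨m', rfl⟩ : ∃ m', m = m'+1 := ⟨m-1, by omega⟩
  simp only [pvDig, if_neg (by omega : ¬ m'+1 = 0), Nat.add_sub_cancel]
  have hsplit : (10:Int)^(m'+1) = 10^m' % f * 10 + 10*(10^m'/f) * f := by
    rw [pow_succ]
    linear_combination (-10 : Int) * (Int.emod_add_mul_ediv ((10:Int)^m') f)
  rw [hsplit, Int.add_mul_ediv_right _ _ (by omega)]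
  ring

lemma pvDig_bounds (f : Int) (hf : 0 < f) (m : Nat) : 0 ≤ pvDig f m ∧ pvDig f m ≤ 9 := by
  rcases Nat.eq_zero_or_pos m with hm | hm
  · subst hm
    simp only [pvDig, if_pos rfl]
    rcases eq_or_lt_of_le (by omega : (1:Int) ≤ f) with hf1 | hf2
    · rw [← hf1]; norm_num
    · rw [Int.ediv_eq_zero_of_lt (by norm_num) (by omega)]; norm_num
  · rw [pvDig_eq f hf m hm]
    have hr0 : 0 ≤ 10^(m-1) % f := Int.emod_nonneg _ (by omega)
    have hrf : 10^(m-1) % f < f := Int.emod_lt_of_pos _ hf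
    constructor
    · exact Int.ediv_nonneg (by omega) (by omega)
    · have : (10^(m-1) % f) * 10 / f < 10 := by
        rw [Int.ediv_lt_iff_lt_mul hf]; omega
      omega

lemma pvX_mod (f : Int) (hf : 0 < f) (i : Nat) :
    (if i = 0 then (1:Int) else 10^(i-1) % f * 10) % f = 10^i % f := by
  rcases Nat.eq_zero_or_pos i with hi | hi
  · subst hi; simp
  · obtain ⟨i', rfl⟩ : ∃ i', i = i'+1 := ⟨i-1, by omega⟩
    rw [if_neg (by omega), Nat.add_sub_cancel, pow_succ,
        Int.mul_emod, Int.mul_emod (10^i') 10, Int.emod_emod_of_dvd _ (dvd_refl f)]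

lemma dziel_fold (f : Int) (hf : 0 < f) (L : Nat) :
    ∀ i, i ≤ L →
    (PySem.List.pyRange 0 (i:Int) 1).foldl (fun (st : Int × List Int) idx =>
        let cc := PySem.Int.floordiv st.1 f
        let t := PySem.List.pySetD st.2 idx cc
        let od := cc * f
        ((st.1 - od) * 10, t)) (1, (List.range L).map (fun _ => (0:Int)))
    = ((if i = 0 then 1 else (10^(i-1) % f) * 10),
       (List.range L).map (fun m => if m < i then pvDig f m else 0)) := by
  intro i
  induction i with
  | zero =>
    intro _
    rw [PySem.List.pyRange_one_eq_nil (by simp)]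
    simp
  | succ i ih =>
    intro hi
    have hcast : ((i+1 : Nat) : Int) = (i:Int) + 1 := by push_cast; ring
    rw [hcast, PySem.List.pyRange_one_succ_right (by omega), List.foldl_append,
        ih (by omega)]
    simp only [List.foldl_cons, List.foldl_nil]
    have hdiv : (if i = 0 then (1:Int) else 10^(i-1) % f * 10) / f = pvDig f i := by
      rcases Nat.eq_zero_or_pos i with h0 | h0
      · subst h0; simp [pvDig]
      · rw [if_neg (by omega), ← pvDig_eq f hf i h0]
    have hstep : ((if i = 0 then (1:Int) else 10^(i-1) % f * 10)
        - (if i = 0 then (1:Int) else 10^(i-1) % f * 10) / f * f) * 10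
        = 10^i % f * 10 := by
      have h := Int.emod_def (if i = 0 then (1:Int) else 10^(i-1) % f * 10) f
      have h2 := pvX_mod f hf i
      nlinarith [h, h2]
    rw [PySem.Int.floordiv_eq_ediv_of_pos hf, PySem.List.pySetD_natCast]
    refine Prod.ext ?_ ?_
    · show ((if i = 0 then (1:Int) else 10^(i-1) % f * 10)
        - (if i = 0 then (1:Int) else 10^(i-1) % f * 10) / f * f) * 10
        = if i + 1 = 0 then 1 else 10^(i+1-1) % f * 10
      rw [hstep, if_neg (by omega), Nat.add_sub_cancel]
    · show (((List.range L).map (fun m => if m < i then pvDig f m else 0)).set i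
          ((if i = 0 then (1:Int) else 10^(i-1) % f * 10) / f))
        = (List.range L).map (fun m => if m < i + 1 then pvDig f m else 0)
      rw [hdiv, set_map_range _ _ _ _ (by omega)]
      apply List.map_congr_left
      intro m hm
      by_cases hmi : m = i
      · simp [hmi]
      · by_cases hlt : m < i <;> simp [hmi, hlt] <;> omega

lemma dzielenie_eq (f : Int) (hf : 0 < f) (n : Int) :
    dzielenie 1 f n = (List.range (n+1).toNat).map (pvDig f) := by
  have ht0 : (PySem.List.pyRange 0 (n+1) 1).map (fun _ => (0:Int))
      = (List.range (n+1).toNat).map (fun _ => (0:Int)) := by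
    rw [PySem.List.pyRange_one]
    simp [List.map_map, Function.comp_def, List.map_const']
  simp only [dzielenie, ht0, PySem.List.len_eq, List.length_map, List.length_range]
  rw [dziel_fold f hf (n+1).toNat (n+1).toNat le_rfl]
  apply List.map_congr_left
  intro m hm
  simp at hm
  simp [hm]

lemma pvR_closed (S : Int) (f : Int) (hf : 0 < f) (N : Nat) :
    ∀ k, k ≤ N → pvR S (pvDig f) N k = S + 10^N / f - 10^k * (10^(N-k) / f) := by
  intro k
  induction k with
  | zero => intro _; simp [pvR]
  | succ k ih =>
    intro hk
    have hk' : k ≤ N := by omega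
    have h1 : N - k ≠ 0 := by omega
    have h2 : N - k - 1 = N - (k+1) := by omega
    simp only [pvR, ih hk', pvDig, if_neg h1, h2]
    rw [pow_succ]
    ring

lemma pvR_top (S : Int) (f : Int) (hf : 0 < f) (N : Nat) :
    pvR S (pvDig f) N (N+1) = S + 10^N / f := by
  have h := pvR_closed S f hf N N le_rfl
  have h0 : pvDig f 0 = 1/f := by simp [pvDig]
  simp only [pvR, h, Nat.sub_self, pow_zero, h0]
  ring

lemma pvR_sub_bounds (S : Int) (d : Nat → Int) (hd : ∀ m, 0 ≤ d m ∧ d m ≤ 9) (N : Nat) :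
    ∀ k, 0 ≤ pvR S d N k - S ∧ pvR S d N k - S < 10^k := by
  intro k
  induction k with
  | zero => simp [pvR]
  | succ k ih =>
    have hdk := hd (N - k)
    have hp : (0:Int) < 10^k := pow_pos (by norm_num) k
    have hps : (10:Int)^(k+1) = 10^k * 10 := pow_succ 10 k
    simp only [pvR]
    constructor <;> nlinarith [ih.1, ih.2, hdk.1, hdk.2]

lemma pvR_dvd (S : Int) (d : Nat → Int) (N : Nat) (a b : Nat) (hab : a ≤ b) :
    (10^a : Int) ∣ (pvR S d N b - pvR S d N a) := by
  induction b with
  | zero => have : a = 0 := by omega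
            subst this; simp
  | succ b ih =>
    rcases Nat.eq_or_lt_of_le hab with h | h
    · rw [h]; simp
    · have hab' : a ≤ b := by omega
      have h2 : (10^a : Int) ∣ d (N-b) * 10^b :=
        Dvd.dvd.mul_left (pow_dvd_pow 10 hab') _
      have h3 : pvR S d N (b+1) - pvR S d N a
          = (pvR S d N b - pvR S d N a) + d (N-b) * 10^b := by
        simp only [pvR]; ring
      rw [h3]
      exact dvd_add (ih hab') h2

lemma pvC_mem (S : Int) (hS : 0 ≤ S) (d : Nat → Int) (hd : ∀ m, 0 ≤ d m ∧ d m ≤ 9)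
    (N j : Nat) : pvC S d N j = 0 ∨ pvC S d N j = 1 := by
  have hb := pvR_sub_bounds S d hd N (N-j)
  have hP : (0:Int) < 10^(N-j) := pow_pos (by norm_num) _
  have hlo : S / 10^(N-j) ≤ pvR S d N (N-j) / 10^(N-j) :=
    Int.ediv_le_ediv hP (by omega)
  have hhi : pvR S d N (N-j) / 10^(N-j) ≤ S / 10^(N-j) + 1 := by
    have h1 : pvR S d N (N-j) ≤ S + 1 * 10^(N-j) := by omega
    have h2 := Int.ediv_le_ediv hP h1
    rwa [Int.add_mul_ediv_right _ _ (by omega)] at h2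
  unfold pvC
  omega

lemma pvState_top (S : Int) (d : Nat → Int) (N : Nat) : pvState S d N N = pvRepr S N := by
  unfold pvState pvRepr
  apply List.map_congr_left
  intro k hk
  by_cases h : k < N
  · simp [h]
  · have hkN : k = N := by simp at hk; omega
    subst hkN
    simp [pvC, pvR]

-- the heart: one pass of A's carry loop turns pvState into the representation of pvR (N+1)

lemma pvDigit_bounds (S : Int) (N k : Nat) (hk : k ≠ 0) :
    0 ≤ pvDigit S N k ∧ pvDigit S N k ≤ 9 := by
  simp only [pvDigit, if_neg hk]
  have h1 := Int.emod_nonneg (S / 10^(N-k)) (by norm_num : (10:Int) ≠ 0)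
  have h2 := Int.emod_lt_of_pos (S / 10^(N-k)) (by norm_num : (0:Int) < 10)
  omega

-- arithmetic core of one carry step at position j+1 (e := N-(j+1))
lemma carry_key (S : Int) (hS : 0 ≤ S) (d : Nat → Int)
    (hd : ∀ m, 0 ≤ d m ∧ d m ≤ 9) (N j : Nat) (hj : j + 1 ≤ N) :
    (pvDigit S N (j+1) + pvC S d N (j+1) + d (j+1)) / 10 = pvC S d N j ∧
    (pvDigit S N (j+1) + pvC S d N (j+1) + d (j+1)) % 10
      = pvDigit (pvR S d N (N+1)) N (j+1) ∧
    0 ≤ pvDigit S N (j+1) + pvC S d N (j+1) + d (j+1) ∧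
    pvDigit S N (j+1) + pvC S d N (j+1) + d (j+1) ≤ 19 := by
  set e := N - (j+1) with he
  have hNj : N - j = e + 1 := by omega
  have hNe : N - e = j + 1 := by omega
  have hpe : (0:Int) < 10^e := pow_pos (by norm_num) e
  -- the running value one step up
  have hRsucc : pvR S d N (e+1) = pvR S d N e + d (j+1) * 10^e := by
    simp only [pvR, hNe]
  have hdivR : pvR S d N (e+1) / 10^e = pvR S d N e / 10^e + d (j+1) := by
    rw [hRsucc, Int.add_mul_ediv_right _ _ (by omega)]
  have hSdd : S / 10^e / 10 = S / 10^(e+1) := by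
    rw [Int.ediv_ediv_of_nonneg (le_of_lt hpe), ← pow_succ]
  have hmod : S / 10^e % 10 = S / 10^e - 10 * (S / 10^(e+1)) := by
    rw [← hSdd]; exact Int.emod_def (S / 10^e) 10
  -- v in closed form
  have hv : pvDigit S N (j+1) + pvC S d N (j+1) + d (j+1)
      = pvR S d N (e+1) / 10^e - 10 * (S / 10^(e+1)) := by
    simp only [pvDigit, if_neg (by omega : ¬ j+1 = 0), pvC, ← he]
    omega
  -- v / 10 = pending carry into position j
  have hRdd : pvR S d N (e+1) / 10^e / 10 = pvR S d N (e+1) / 10^(e+1) := by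
    rw [Int.ediv_ediv_of_nonneg (le_of_lt hpe), ← pow_succ]
  have hvdiv : (pvDigit S N (j+1) + pvC S d N (j+1) + d (j+1)) / 10 = pvC S d N j := by
    rw [hv, show pvR S d N (e+1) / 10^e - 10 * (S / 10^(e+1))
        = pvR S d N (e+1) / 10^e + (-(S / 10^(e+1))) * 10 from by ring,
      Int.add_mul_ediv_right _ _ (by norm_num : (10:Int) ≠ 0), hRdd]
    simp only [pvC, hNj]
    ring
  -- v % 10 = the final digit at position j+1
  have hdvd := pvR_dvd S d N (e+1) (N+1) (by omega)
  obtain ⟨c, hc⟩ := hdvd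
  have hRN : pvR S d N (N+1) / 10^e = pvR S d N (e+1) / 10^e + 10 * c := by
    have : pvR S d N (N+1) = pvR S d N (e+1) + (10*c) * 10^e := by
      rw [show pvR S d N (N+1) = pvR S d N (e+1) + (pvR S d N (N+1) - pvR S d N (e+1)) from by ring,
          hc, pow_succ]
      ring
    rw [this, Int.add_mul_ediv_right _ _ (by omega)]
  have hvmod : (pvDigit S N (j+1) + pvC S d N (j+1) + d (j+1)) % 10
      = pvDigit (pvR S d N (N+1)) N (j+1) := by
    rw [hv, show pvDigit (pvR S d N (N+1)) N (j+1) = pvR S d N (N+1) / 10^e % 10 from by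
      simp only [pvDigit, if_neg (by omega : ¬ j+1 = 0), ← he]]
    omega
  -- bounds
  have hdig := pvDigit_bounds S N (j+1) (by omega)
  have hcmem := pvC_mem S hS d hd N (j+1)
  have hdj := hd (j+1)
  exact ⟨hvdiv, hvmod, by omega, by omega⟩

lemma carry_step (N : Nat) (S : Int) (hS : 0 ≤ S) (d : Nat → Int)
    (hd : ∀ m, 0 ≤ d m ∧ d m ≤ 9) (td : List Int) (htd : ∀ k, k ≤ N → td.getD k 0 = d k)
    (j : Nat) (hj : j + 1 ≤ N) :
    (if ((j+1:Nat):Int) ≠ 0 ∧ PySem.List.pyGetD (PySem.List.pySetD (pvState S d N (j+1)) ((j+1:Nat):Int) (PySem.List.pyGetD (pvState S d N (j+1)) ((j+1:Nat):Int) 0 + PySem.List.pyGetD td ((j+1:Nat):Int) 0)) ((j+1:Nat):Int) 0 ≥ 10 then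
      PySem.List.pySetD (PySem.List.pySetD (PySem.List.pySetD (pvState S d N (j+1)) ((j+1:Nat):Int) (PySem.List.pyGetD (pvState S d N (j+1)) ((j+1:Nat):Int) 0 + PySem.List.pyGetD td ((j+1:Nat):Int) 0)) (((j+1:Nat):Int) - 1) (PySem.List.pyGetD (PySem.List.pySetD (pvState S d N (j+1)) ((j+1:Nat):Int) (PySem.List.pyGetD (pvState S d N (j+1)) ((j+1:Nat):Int) 0 + PySem.List.pyGetD td ((j+1:Nat):Int) 0)) (((j+1:Nat):Int) - 1) 0 + 1)) ((j+1:Nat):Int) (PySem.Int.mod (PySem.List.pyGetD (PySem.List.pySetD (PySem.List.pySetD (pvState S d N (j+1)) ((j+1:Nat):Int) (PySem.List.pyGetD (pvState S d N (j+1)) ((j+1:Nat):Int) 0 + PySem.List.pyGetD td ((j+1:Nat):Int) 0)) (((j+1:Nat):Int) - 1) (PySem.List.pyGetD (PySem.List.pySetD (pvState S d N (j+1)) ((j+1:Nat):Int) (PySem.List.pyGetD (pvState S d N (j+1)) ((j+1:Nat):Int) 0 + PySem.List.pyGetD td ((j+1:Nat):Int) 0)) (((j+1:Nat):Int) - 1)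 0 + 1)) ((j+1:Nat):Int) 0) 10)
    else PySem.List.pySetD (pvState S d N (j+1)) ((j+1:Nat):Int) (PySem.List.pyGetD (pvState S d N (j+1)) ((j+1:Nat):Int) 0 + PySem.List.pyGetD td ((j+1:Nat):Int) 0)) = pvState S d N j := by
  obtain ⟨hkey1, hkey2, hkey3, hkey4⟩ := carry_key S hS d hd N j hj
  have hcast1 : ((j+1:Nat):Int) - 1 = ((j:Nat):Int) := by push_cast; ring
  rw [hcast1]
  simp only [PySem.List.pyGetD_natCast, PySem.List.pySetD_natCast, htd (j+1) (by omega)]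
  simp only [pvState]
  rw [PySem.List.getD_map_range _ _ _ _ (by omega : j+1 < N+1)]
  rw [set_map_range _ _ _ _ (by omega : j+1 < N+1)]
  rw [PySem.List.getD_map_range _ _ _ _ (by omega : j+1 < N+1)]
  rw [PySem.List.getD_map_range _ _ _ _ (by omega : j < N+1)]
  simp only [eq_false (by omega : ¬ (j+1) < (j+1)), eq_true (rfl : (j+1:Nat) = (j+1:Nat)),
             eq_true (by omega : j < j+1), eq_false (by omega : ¬ j = j+1), if_true, if_false]
  by_cases hcarry : 10 ≤ pvDigit S N (j+1) + pvC S d N (j+1) + d (j+1)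
  · rw [if_pos ⟨by exact_mod_cast Nat.succ_ne_zero j, hcarry⟩]
    rw [set_map_range _ _ _ _ (by omega : j < N+1)]
    rw [PySem.List.getD_map_range _ _ _ _ (by omega : j+1 < N+1)]
    rw [set_map_range _ _ _ _ (by omega : j+1 < N+1)]
    simp only [eq_false (by omega : ¬ (j+1) = j), if_false,
               eq_true (rfl : (j+1:Nat) = (j+1:Nat)), if_true]
    apply List.map_congr_left
    intro k hk
    have hkN : k < N+1 := by simpa using hk
    rw [PySem.Int.mod_eq_emod_of_pos (by norm_num : (0:Int) < 10)]
    by_cases hk1 : k = j+1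
    · simp only [hk1, eq_true (rfl : (j+1:Nat) = (j+1:Nat)), if_true,
                 eq_false (by omega : ¬ (j+1) < j), if_false,
                 eq_false (by omega : ¬ (j+1) = j)]
      omega
    · by_cases hk2 : k = j
      · simp only [hk2, eq_false (by omega : ¬ j = j+1), if_false, eq_true (rfl : (j:Nat) = j), if_true,
                   eq_false (by omega : ¬ j < j)]
        omega
      · simp only [eq_false hk1, if_false, eq_false hk2]
        by_cases hk3 : k < j
        · simp only [eq_true hk3, if_true, eq_true (by omega : k < j+1), if_true, if_false]
        · simp only [eq_false hk3, if_false, eq_false (by omega : ¬ k < j+1)]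
  · rw [if_neg (fun hcon => hcarry hcon.2)]
    apply List.map_congr_left
    intro k hk
    have hkN : k < N+1 := by simpa using hk
    by_cases hk1 : k = j+1
    · simp only [hk1, eq_true (rfl : (j+1:Nat) = (j+1:Nat)), if_true,
                 eq_false (by omega : ¬ (j+1) < j), if_false,
                 eq_false (by omega : ¬ (j+1) = j)]
      omega
    · by_cases hk2 : k = j
      · simp only [hk2, eq_false (by omega : ¬ j = j+1), if_false, eq_true (by omega : j < j+1), if_true,
                   eq_false (by omega : ¬ j < j), eq_true (rfl : (j:Nat) = j)]
        omega
      · simp only [eq_false hk1, if_false, eq_false hk2]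
        by_cases hk3 : k < j
        · simp only [eq_true hk3, if_true, eq_true (by omega : k < j+1), if_true]
        · simp only [eq_false hk3, if_false, eq_false (by omega : ¬ k < j+1)]

lemma carry_base (N : Nat) (S : Int) (d : Nat → Int) (td : List Int)
    (htd : ∀ k, k ≤ N → td.getD k 0 = d k) :
    (if (0:Int) ≠ 0 ∧ PySem.List.pyGetD (PySem.List.pySetD (pvState S d N 0) 0 (PySem.List.pyGetD (pvState S d N 0) 0 0 + PySem.List.pyGetD td 0 0)) 0 0 ≥ 10 then
      PySem.List.pySetD (PySem.List.pySetD (PySem.List.pySetD (pvState S d N 0) 0 (PySem.List.pyGetD (pvState S d N 0) 0 0 + PySem.List.pyGetD td 0 0)) (0 - 1) (PySem.List.pyGetD (PySem.List.pySetD (pvState S d N 0) 0 (PySem.List.pyGetD (pvState S d N 0) 0 0 + PySem.List.pyGetD td 0 0)) (0 - 1) 0 + 1)) 0 (PySem.Int.mod (PySem.List.pyGetD (PySem.List.pySetD (PySem.List.pySetD (pvState S d N 0) 0 (PySem.List.pyGetD (pvState S d N 0) 0 0 + PySem.List.pyGetD td 0 0)) (0 - 1) (PySem.List.pyGetD (PySem.List.pySetD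 (pvState S d N 0) 0 (PySem.List.pyGetD (pvState S d N 0) 0 0 + PySem.List.pyGetD td 0 0)) (0 - 1) 0 + 1)) 0 0) 10)
    else PySem.List.pySetD (pvState S d N 0) 0 (PySem.List.pyGetD (pvState S d N 0) 0 0 + PySem.List.pyGetD td 0 0)) = pvRepr (pvR S d N (N+1)) N := by
  rw [if_neg (fun hcon => hcon.1 rfl)]
  simp only [PySem.List.pyGetD_zero]
  rw [PySem.List.pySetD_of_nonneg _ _ (le_refl (0:Int)), Int.toNat_zero]
  rw [htd 0 (by omega)]
  simp only [pvState]
  rw [show ((List.range (N+1)).map (fun k =>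
      if k < 0 then pvDigit S N k
      else if k = 0 then pvDigit S N 0 + pvC S d N 0
      else pvDigit (pvR S d N (N+1)) N k)).getD 0 0
      = pvDigit S N 0 + pvC S d N 0 from by
    rw [PySem.List.getD_map_range _ _ _ _ (by omega : 0 < N+1)]
    simp]
  rw [set_map_range _ _ _ _ (by omega : 0 < N+1)]
  unfold pvRepr
  apply List.map_congr_left
  intro k hk
  have hkN : k < N+1 := by simpa using hk
  by_cases hk0 : k = 0
  · simp only [hk0, eq_true (rfl : (0:Nat) = (0:Nat)), if_true]
    have h1 : pvDigit S N 0 = S / 10^N := by simp [pvDigit]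
    have h2 : pvDigit (pvR S d N (N+1)) N 0 = pvR S d N (N+1) / 10^N := by simp [pvDigit]
    have h3 : pvC S d N 0 = pvR S d N N / 10^N - S / 10^N := by simp [pvC]
    have h4 : pvR S d N (N+1) = pvR S d N N + d 0 * 10^N := by simp [pvR]
    have h5 : pvR S d N (N+1) / 10^N = pvR S d N N / 10^N + d 0 := by
      rw [h4, Int.add_mul_ediv_right _ _ (pow_pos (by norm_num : (0:Int) < 10) N).ne']
    omega
  · simp only [eq_false hk0, if_false, eq_false (by omega : ¬ k < 0)]

lemma carry_main (N : Nat) (S : Int) (hS : 0 ≤ S) (d : Nat → Int)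
    (hd : ∀ m, 0 ≤ d m ∧ d m ≤ 9) (td : List Int) (htd : ∀ k, k ≤ N → td.getD k 0 = d k) :
    ∀ j, j ≤ N →
    (PySem.List.pyRange (j:Int) (-1) (-1)).foldl (fun suma jj =>
      let suma := PySem.List.pySetD suma jj (PySem.List.pyGetD suma jj 0 + PySem.List.pyGetD td jj 0)
      if jj ≠ 0 ∧ PySem.List.pyGetD suma jj 0 ≥ 10 then
        let suma := PySem.List.pySetD suma (jj-1) (PySem.List.pyGetD suma (jj-1) 0 + 1)
        PySem.List.pySetD suma jj (PySem.Int.mod (PySem.List.pyGetD suma jj 0) 10)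
      else suma) (pvState S d N j) = pvRepr (pvR S d N (N+1)) N := by
  intro j
  induction j with
  | zero =>
    intro _
    rw [show ((0:Nat):Int) = 0 from by simp,
        PySem.List.pyRange_neg_one_cons (by norm_num : (-1:Int) < 0),
        show (0:Int) - 1 = -1 from by norm_num,
        PySem.List.pyRange_neg_one_eq_nil le_rfl]
    simp only [List.foldl_cons, List.foldl_nil]
    exact carry_base N S d td htd
  | succ j ih =>
    intro hj
    rw [PySem.List.pyRange_neg_one_cons (by omega : (-1:Int) < ((j+1:Nat):Int)),
        show ((j+1:Nat):Int) - 1 = (j:Int) from by push_cast; ring]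
    simp only [List.foldl_cons]
    rw [carry_step N S hS d hd td htd j hj]
    exact ih (by omega)

lemma pvPS_nonneg (N M : Nat) : 0 ≤ pvPS N M := by
  induction M with
  | zero => simp [pvPS]
  | succ M ih =>
    have : (0:Int) ≤ 10^N / pvFact M :=
      Int.ediv_nonneg (by positivity) (le_of_lt (pvFact_pos M))
    simp only [pvPS]
    omega

-- A's outer loop invariant
lemma dzialanie_outer (N : Nat) (n : Int) (hn : n = (N:Int) + 1) :
    ∀ M : Nat,
    (PySem.List.pyRange 0 (M:Int) 1).foldl (fun suma i =>
      let terazniejsza := dzielenie 1 (silnia i) n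
      (PySem.List.pyRange (PySem.List.len suma - 1) (-1) (-1)).foldl (fun suma j =>
        let suma := PySem.List.pySetD suma j (PySem.List.pyGetD suma j 0 + PySem.List.pyGetD terazniejsza j 0)
        if j ≠ 0 ∧ PySem.List.pyGetD suma j 0 ≥ 10 then
          let suma := PySem.List.pySetD suma (j-1) (PySem.List.pyGetD suma (j-1) 0 + 1)
          PySem.List.pySetD suma j (PySem.Int.mod (PySem.List.pyGetD suma j 0) 10)
        else suma) suma) (pvRepr 0 N) = pvRepr (pvPS N M) N := by
  intro M
  induction M with
  | zero =>
    rw [show ((0:Nat):Int) = 0 from by simp, PySem.List.pyRange_one_eq_nil le_rfl]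
    rfl
  | succ M ih =>
    rw [show ((M+1:Nat):Int) = (M:Int) + 1 from by push_cast; ring,
        PySem.List.pyRange_one_succ_right (by omega : (0:Int) ≤ (M:Int)),
        List.foldl_append, ih]
    simp only [List.foldl_cons, List.foldl_nil]
    rw [silnia_eq M, dzielenie_eq (pvFact M) (pvFact_pos M) n]
    have hlen : PySem.List.len (pvRepr (pvPS N M) N) - 1 = (N:Int) := by
      simp only [pvRepr, PySem.List.len_eq, List.length_map, List.length_range]
      push_cast; ring
    rw [hlen]
    have hL : (n+1).toNat = N + 2 := by omega
    rw [hL]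
    have htd : ∀ k, k ≤ N → ((List.range (N+2)).map (pvDig (pvFact M))).getD k 0
        = pvDig (pvFact M) k := fun k hk =>
      PySem.List.getD_map_range _ _ _ _ (by omega)
    rw [show pvRepr (pvPS N M) N = pvState (pvPS N M) (pvDig (pvFact M)) N N from
      (pvState_top _ _ N).symm]
    rw [carry_main N (pvPS N M) (pvPS_nonneg N M) (pvDig (pvFact M))
      (fun m => pvDig_bounds _ (pvFact_pos M) m) _ htd N le_rfl]
    rw [pvR_top _ _ (pvFact_pos M) N]
    rfl

def pvFact' : Nat → Int
  | 0 => 1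
  | (M+1) => pvFact M

-- column sums: pvColSum M m = sum over i < M of the m-th long-division digit of 1/i!
def pvColSum : Nat → Nat → Int
  | 0 => fun _ => 0
  | (M+1) => fun m => pvColSum M m + pvDig (pvFact M) m

lemma colgen_fold (f : Int) (hf : 0 < f) (g : Nat → Int) (L : Nat) :
    ∀ j, j ≤ L →
    (PySem.List.pyRange 0 (j:Int) 1).foldl (fun (rc : Int × List Int) jj =>
        let q := PySem.Int.floordiv rc.1 f
        let r := PySem.Int.mod rc.1 f
        let cols := PySem.List.pySetD rc.2 jj (PySem.List.pyGetD rc.2 jj 0 + q)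
        (r * 10, cols)) (1, (List.range L).map g)
    = ((if j = 0 then 1 else (10^(j-1) % f) * 10),
       (List.range L).map (fun m => if m < j then g m + pvDig f m else g m)) := by
  intro j
  induction j with
  | zero =>
    intro _
    rw [PySem.List.pyRange_one_eq_nil (by simp)]
    simp
  | succ j ih =>
    intro hj
    rw [show ((j+1:Nat):Int) = (j:Int) + 1 from by push_cast; ring,
        PySem.List.pyRange_one_succ_right (by omega : (0:Int) ≤ (j:Int)),
        List.foldl_append, ih (by omega)]
    simp only [List.foldl_cons, List.foldl_nil]
    have hdiv : PySem.Int.floordiv (if j = 0 then (1:Int) else 10^(j-1) % f * 10) f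
        = pvDig f j := by
      rw [PySem.Int.floordiv_eq_ediv_of_pos hf]
      rcases Nat.eq_zero_or_pos j with h0 | h0
      · subst h0; simp [pvDig]
      · rw [if_neg (by omega), ← pvDig_eq f hf j h0]
    have hstep : PySem.Int.mod (if j = 0 then (1:Int) else 10^(j-1) % f * 10) f * 10
        = if j + 1 = 0 then (1:Int) else 10^(j+1-1) % f * 10 := by
      rw [PySem.Int.mod_eq_emod_of_pos hf, pvX_mod f hf j, if_neg (by omega),
          Nat.add_sub_cancel]
    refine Prod.ext hstep ?_
    show (PySem.List.pySetD ((List.range L).map (fun m => if m < j then g m + pvDig f m else g m)) ((j:Nat):Int)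
        (PySem.List.pyGetD ((List.range L).map (fun m => if m < j then g m + pvDig f m else g m)) ((j:Nat):Int) 0
          + PySem.Int.floordiv (if j = 0 then (1:Int) else 10^(j-1) % f * 10) f))
      = (List.range L).map (fun m => if m < j + 1 then g m + pvDig f m else g m)
    rw [PySem.List.pySetD_natCast, PySem.List.pyGetD_natCast, hdiv,
        PySem.List.getD_map_range _ _ _ _ (by omega : j < L),
        if_neg (by omega : ¬ j < j), set_map_range _ _ _ _ (by omega : j < L)]
    apply List.map_congr_left
    intro m hm
    by_cases hmj : m = j
    · simp [hmj]
    · by_cases hlt : m < j <;> simp [hmj, hlt] <;> omega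

lemma alt_outer (N : Nat) (n : Int) (hn : n = (N:Int) + 1) :
    ∀ M : Nat,
    (PySem.List.pyRange 0 (M:Int) 1).foldl (fun (st : Int × List Int) i =>
      let f := if i > 1 then st.1 * i else st.1
      let rc := (PySem.List.pyRange 0 n 1).foldl (fun (rc : Int × List Int) j =>
          let q := PySem.Int.floordiv rc.1 f
          let r := PySem.Int.mod rc.1 f
          let cols := PySem.List.pySetD rc.2 j (PySem.List.pyGetD rc.2 j 0 + q)
          (r * 10, cols)) (1, st.2)
      (f, rc.2)) (1, (List.range (N+1)).map (fun _ => (0:Int)))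
    = (pvFact' M, (List.range (N+1)).map (pvColSum M)) := by
  intro M
  induction M with
  | zero =>
    rw [show ((0:Nat):Int) = 0 from by simp, PySem.List.pyRange_one_eq_nil le_rfl]
    rfl
  | succ M ih =>
    rw [show ((M+1:Nat):Int) = (M:Int) + 1 from by push_cast; ring,
        PySem.List.pyRange_one_succ_right (by omega : (0:Int) ≤ (M:Int)),
        List.foldl_append, ih]
    simp only [List.foldl_cons, List.foldl_nil]
    have hf : (if ((M:Int) > 1) then pvFact' M * (M:Int) else pvFact' M) = pvFact M := by
      match M with
      | 0 => norm_num [pvFact', pvFact]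
      | 1 => norm_num [pvFact', pvFact]
      | (m+2) =>
        rw [if_pos (by push_cast; omega : ((m+2:Nat):Int) > 1)]
        show pvFact (m+1) * ((m+2:Nat):Int) = pvFact (m+2)
        show pvFact (m+1) * ((m+2:Nat):Int) = pvFact (m+1) * ((m+1:Int)+1)
        push_cast; ring
    rw [hf, show n = ((N+1:Nat):Int) from by rw [hn]; push_cast; ring,
        colgen_fold (pvFact M) (pvFact_pos M) (pvColSum M) (N+1) (N+1) le_rfl]
    refine Prod.ext rfl ?_
    show (List.range (N+1)).map (fun m => if m < N+1 then pvColSum M m + pvDig (pvFact M) m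
        else pvColSum M m) = (List.range (N+1)).map (pvColSum (M+1))
    apply List.map_congr_left
    intro m hm
    have : m < N + 1 := by simpa using hm
    rw [if_pos this]
    rfl

lemma pvR_add (a b : Nat → Int) (N : Nat) :
    ∀ k, pvR 0 (fun m => a m + b m) N k = pvR 0 a N k + pvR 0 b N k := by
  intro k
  induction k with
  | zero => simp [pvR]
  | succ k ih => simp only [pvR, ih]; ring

lemma pvR_zero_fun (N : Nat) : ∀ k, pvR 0 (fun _ => (0:Int)) N k = 0 := by
  intro k
  induction k with
  | zero => simp [pvR]
  | succ k ih => simp [pvR, ih]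

lemma pvV_colsum (N : Nat) : ∀ M, pvR 0 (pvColSum M) N (N+1) = pvPS N M := by
  intro M
  induction M with
  | zero =>
    show pvR 0 (fun _ => (0:Int)) N (N+1) = pvPS N 0
    rw [pvR_zero_fun]
    rfl
  | succ M ih =>
    show pvR 0 (fun m => pvColSum M m + pvDig (pvFact M) m) N (N+1) = pvPS N (M+1)
    rw [pvR_add, ih, show pvR 0 (pvDig (pvFact M)) N (N+1) = 0 + 10^N / pvFact M from
      pvR_top 0 (pvFact M) (pvFact_pos M) N]
    simp only [pvPS]
    ring

lemma colcarry_key (N : Nat) (g : Nat → Int) (j : Nat) (hj : j + 1 ≤ N) :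
    PySem.Int.floordiv (g (j+1) + pvC 0 g N (j+1)) 10 = pvC 0 g N j ∧
    PySem.Int.mod (g (j+1) + pvC 0 g N (j+1)) 10 = pvDigit (pvR 0 g N (N+1)) N (j+1) := by
  set e := N - (j+1) with he
  have hpe : (0:Int) < 10^e := pow_pos (by norm_num) e
  have hC1 : pvC 0 g N (j+1) = pvR 0 g N e / 10^e := by
    simp [pvC, ← he]
  have hW : pvR 0 g N (e+1) = pvR 0 g N e + g (j+1) * 10^e := by
    simp only [pvR, show N - e = j + 1 from by omega]
  have hs : g (j+1) + pvC 0 g N (j+1) = pvR 0 g N (e+1) / 10^e := by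
    rw [hC1, hW, Int.add_mul_ediv_right _ _ (by omega)]
    ring
  constructor
  · rw [PySem.Int.floordiv_eq_ediv_of_pos (by norm_num), hs,
        Int.ediv_ediv_of_nonneg (le_of_lt hpe), ← pow_succ]
    simp [pvC, show N - j = e + 1 from by omega]
  · rw [PySem.Int.mod_eq_emod_of_pos (by norm_num), hs]
    obtain ⟨c, hc⟩ := pvR_dvd 0 g N (e+1) (N+1) (by omega)
    have hRN : pvR 0 g N (N+1) / 10^e = pvR 0 g N (e+1) / 10^e + 10 * c := by
      have h2 : pvR 0 g N (N+1) = pvR 0 g N (e+1) + (10*c) * 10^e := by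
        rw [show pvR 0 g N (N+1) = pvR 0 g N (e+1)
            + (pvR 0 g N (N+1) - pvR 0 g N (e+1)) from by ring, hc, pow_succ]
        ring
      rw [h2, Int.add_mul_ediv_right _ _ (by omega)]
    rw [show pvDigit (pvR 0 g N (N+1)) N (j+1) = pvR 0 g N (N+1) / 10^e % 10 from by
      simp only [pvDigit, if_neg (by omega : ¬ j+1 = 0), ← he]]
    omega

lemma colcarry (N : Nat) (g : Nat → Int) :
    ∀ j, j ≤ N →
    (PySem.List.pyRange (j:Int) 0 (-1)).foldl (fun (cc : Int × List Int) jj =>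
      let s := PySem.List.pyGetD cc.2 jj 0 + cc.1
      (PySem.Int.floordiv s 10, PySem.List.pySetD cc.2 jj (PySem.Int.mod s 10)))
      (pvC 0 g N j, (List.range (N+1)).map (fun m =>
        if m ≤ j then g m else pvDigit (pvR 0 g N (N+1)) N m))
    = (pvC 0 g N 0, (List.range (N+1)).map (fun m =>
        if m = 0 then g m else pvDigit (pvR 0 g N (N+1)) N m)) := by
  intro j
  induction j with
  | zero =>
    intro _
    rw [show ((0:Nat):Int) = 0 from by simp, PySem.List.pyRange_neg_one_eq_nil le_rfl]
    simp only [List.foldl_nil]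
    refine Prod.ext rfl ?_
    show (List.range (N+1)).map (fun m => if m ≤ 0 then g m else pvDigit (pvR 0 g N (N+1)) N m)
      = (List.range (N+1)).map (fun m => if m = 0 then g m else pvDigit (pvR 0 g N (N+1)) N m)
    apply List.map_congr_left
    intro m _
    by_cases hm0 : m = 0
    · simp [hm0]
    · rw [if_neg (by omega), if_neg hm0]
  | succ j ih =>
    intro hj
    obtain ⟨hk1, hk2⟩ := colcarry_key N g j hj
    rw [PySem.List.pyRange_neg_one_cons (by omega : (0:Int) < ((j+1:Nat):Int)),
        show ((j+1:Nat):Int) - 1 = (j:Int) from by push_cast; ring]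
    simp only [List.foldl_cons]
    have hget : PySem.List.pyGetD ((List.range (N+1)).map (fun m =>
        if m ≤ j+1 then g m else pvDigit (pvR 0 g N (N+1)) N m)) ((j+1:Nat):Int) 0
        = g (j+1) := by
      rw [PySem.List.pyGetD_natCast, PySem.List.getD_map_range _ _ _ _ (by omega : j+1 < N+1),
          if_pos le_rfl]
    rw [hget, hk1, hk2, PySem.List.pySetD_natCast,
        set_map_range _ _ _ _ (by omega : j+1 < N+1)]
    have hlist : (List.range (N+1)).map (fun m =>
        if m = j+1 then pvDigit (pvR 0 g N (N+1)) N (j+1)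
        else if m ≤ j+1 then g m else pvDigit (pvR 0 g N (N+1)) N m)
        = (List.range (N+1)).map (fun m =>
        if m ≤ j then g m else pvDigit (pvR 0 g N (N+1)) N m) := by
      apply List.map_congr_left
      intro m _
      by_cases hm1 : m = j+1
      · rw [if_pos hm1, if_neg (by omega), hm1]
      · rw [if_neg hm1]
        by_cases hm2 : m ≤ j
        · rw [if_pos (by omega), if_pos hm2]
        · rw [if_neg (by omega), if_neg hm2]
    rw [hlist]
    exact ih (by omega)

lemma colfinal0 (N : Nat) (g : Nat → Int) :
    g 0 + pvC 0 g N 0 = pvDigit (pvR 0 g N (N+1)) N 0 := by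
  have hW : pvR 0 g N (N+1) = pvR 0 g N N + g 0 * 10^N := by
    simp only [pvR, Nat.sub_self]
  have h2 : pvR 0 g N (N+1) / 10^N = pvR 0 g N N / 10^N + g 0 := by
    rw [hW, Int.add_mul_ediv_right _ _ (pow_pos (by norm_num : (0:Int) < 10) N).ne']
  simp only [pvDigit, if_pos rfl, pvC, Nat.sub_zero, h2]
  simp
  ring

lemma colcarry_top (N : Nat) (g : Nat → Int) :
    List.foldl (fun (cc : Int × List Int) j =>
      (PySem.Int.floordiv (PySem.List.pyGetD cc.2 j 0 + cc.1) 10,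
       PySem.List.pySetD cc.2 j (PySem.Int.mod (PySem.List.pyGetD cc.2 j 0 + cc.1) 10)))
      ((0:Int), (List.range (N+1)).map g) (PySem.List.pyRange (N:Int) 0 (-1))
    = (pvC 0 g N 0, (List.range (N+1)).map (fun m =>
        if m = 0 then g m else pvDigit (pvR 0 g N (N+1)) N m)) := by
  have h1 : ((0:Int), (List.range (N+1)).map g)
      = (pvC 0 g N N, (List.range (N+1)).map (fun m =>
        if m ≤ N then g m else pvDigit (pvR 0 g N (N+1)) N m)) := by
    refine Prod.ext (by simp [pvC, pvR]) ?_
    show (List.range (N+1)).map g = _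
    apply List.map_congr_left
    intro m hm
    rw [if_pos (by simpa [Nat.lt_succ_iff] using hm)]
  rw [h1]
  exact colcarry N g N le_rfl

lemma pyRange_toNat (a : Int) :
    PySem.List.pyRange 0 a 1 = PySem.List.pyRange 0 (a.toNat : Int) 1 := by
  by_cases h : 0 ≤ a
  · rw [Int.toNat_of_nonneg h]
  · rw [PySem.List.pyRange_one_eq_nil (by omega), PySem.List.pyRange_one_eq_nil (by omega)]

lemma pvRepr_zero (N : Nat) : pvRepr 0 N = List.replicate (N+1) 0 := by
  rw [List.eq_replicate_iff]
  constructor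
  · simp [pvRepr]
  · intro b hb
    simp only [pvRepr, List.mem_map] at hb
    obtain ⟨k, _, rfl⟩ := hb
    simp [pvDigit]

lemma dzialanie_eq_alt (ilosc n : Int) : dzialanie ilosc n = dzialanie_alt ilosc n := by
  by_cases hn : n ≤ 0
  · have hB : dzialanie_alt ilosc n = [] := by
      simp only [dzialanie_alt]
      rw [show n.toNat = 0 from by omega, List.replicate_zero,
          PySem.List.pyRange_one_eq_nil (by omega : n ≤ 0),
          PySem.List.pyRange_neg_one_eq_nil (by omega : n - 1 ≤ 0)]
      simp only [List.foldl_nil]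
      rw [if_neg (by omega : ¬ n > 0)]
      have hfix : ∀ (l : List Int) (st : Int × List Int), (List.foldl (fun (st : Int × List Int) i =>
          let f := if i > 1 then st.1 * i else st.1
          let rc := (List.foldl (fun (rc : Int × List Int) j =>
              let q := PySem.Int.floordiv rc.1 f
              let r := PySem.Int.mod rc.1 f
              let cols := PySem.List.pySetD rc.2 j (PySem.List.pyGetD rc.2 j 0 + q)
              (r * 10, cols)) (1, st.2) ([] : List Int))
          (f, rc.2)) st l).2 = st.2 := by
        intro l
        induction l with
        | nil => intro st; rfl
        | cons a l ih =>
          intro st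
          simp only [List.foldl_cons]
          rw [ih]
          rfl
      exact hfix _ _
    have hA : dzialanie ilosc n = [] := by
      simp only [dzialanie]
      rw [PySem.List.pyRange_one_eq_nil (by omega : n ≤ 0)]
      simp only [List.map_nil]
      have hfix : ∀ l : List Int, List.foldl (fun suma i =>
          let terazniejsza := dzielenie 1 (silnia i) n
          (PySem.List.pyRange (PySem.List.len suma - 1) (-1) (-1)).foldl (fun suma j =>
            let suma := PySem.List.pySetD suma j (PySem.List.pyGetD suma j 0 + PySem.List.pyGetD terazniejsza j 0)
            if j ≠ 0 ∧ PySem.List.pyGetD suma j 0 ≥ 10 then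
              let suma := PySem.List.pySetD suma (j-1) (PySem.List.pyGetD suma (j-1) 0 + 1)
              PySem.List.pySetD suma j (PySem.Int.mod (PySem.List.pyGetD suma j 0) 10)
            else suma) suma) ([] : List Int) l = [] := by
        intro l
        induction l with
        | nil => rfl
        | cons a l ih =>
          simp only [List.foldl_cons]
          rw [show (PySem.List.len ([] : List Int) - 1 : Int) = -1 from by
            simp [PySem.List.len_eq]]
          rw [PySem.List.pyRange_neg_one_eq_nil le_rfl]
          exact ih
      exact hfix _
    rw [hA, hB]
  · set N := (n-1).toNat with hN
    have hn1 : n = (N:Int) + 1 := by omega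
    have hA : dzialanie ilosc n = pvRepr (pvPS N (ilosc+1).toNat) N := by
      simp only [dzialanie]
      have hsuma : (PySem.List.pyRange 0 n 1).map (fun _ => (0:Int)) = pvRepr 0 N := by
        rw [List.map_const', PySem.List.length_pyRange_one, pvRepr_zero,
          show (n - 0).toNat = N + 1 from by omega]
      rw [hsuma, pyRange_toNat (ilosc+1)]
      exact dzialanie_outer N n hn1 (ilosc+1).toNat
    have hB : dzialanie_alt ilosc n = pvRepr (pvPS N (ilosc+1).toNat) N := by
      simp only [dzialanie_alt]
      rw [show List.replicate n.toNat (0:Int) = (List.range (N+1)).map (fun _ => (0:Int)) from by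
        rw [List.map_const', List.length_range, show n.toNat = N+1 from by omega]]
      rw [pyRange_toNat (ilosc+1), alt_outer N n hn1 (ilosc+1).toNat]
      rw [show ((pvFact' (ilosc+1).toNat, (List.range (N+1)).map (pvColSum (ilosc+1).toNat))
          : Int × List Int).2 = (List.range (N+1)).map (pvColSum (ilosc+1).toNat) from rfl]
      rw [show n - 1 = ((N:Nat):Int) from by omega]
      rw [colcarry_top N (pvColSum (ilosc+1).toNat)]
      rw [if_pos (by omega : n > 0)]
      rw [show ((pvC 0 (pvColSum (ilosc+1).toNat) N 0, (List.range (N+1)).map (fun m =>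
          if m = 0 then pvColSum (ilosc+1).toNat m
          else pvDigit (pvR 0 (pvColSum (ilosc+1).toNat) N (N+1)) N m)) : Int × List Int).2
          = (List.range (N+1)).map (fun m =>
          if m = 0 then pvColSum (ilosc+1).toNat m
          else pvDigit (pvR 0 (pvColSum (ilosc+1).toNat) N (N+1)) N m) from rfl]
      rw [show ((pvC 0 (pvColSum (ilosc+1).toNat) N 0, (List.range (N+1)).map (fun m =>
          if m = 0 then pvColSum (ilosc+1).toNat m
          else pvDigit (pvR 0 (pvColSum (ilosc+1).toNat) N (N+1)) N m)) : Int × List Int).1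
          = pvC 0 (pvColSum (ilosc+1).toNat) N 0 from rfl]
      rw [PySem.List.pyGetD_zero, PySem.List.pySetD_of_nonneg _ _ (le_refl (0:Int)),
        Int.toNat_zero]
      rw [show ((List.range (N+1)).map (fun m =>
          if m = 0 then pvColSum (ilosc+1).toNat m
          else pvDigit (pvR 0 (pvColSum (ilosc+1).toNat) N (N+1)) N m)).getD 0 0
          = pvColSum (ilosc+1).toNat 0 from by
        rw [PySem.List.getD_map_range _ _ _ _ (by omega : 0 < N+1)]
        simp]
      rw [set_map_range _ _ _ _ (by omega : 0 < N+1)]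
      unfold pvRepr
      apply List.map_congr_left
      intro m hm
      have hmN : m < N+1 := by simpa using hm
      by_cases hm0 : m = 0
      · rw [if_pos hm0, hm0, colfinal0 N (pvColSum (ilosc+1).toNat), pvV_colsum]
      · rw [if_neg hm0, if_neg hm0, pvV_colsum]
    rw [hA, hB]

-- ===== VERDICT (by name: the statement is the Claim_ definition above) =====
theorem dzialanie_spec : Claim_equal_dzialanie := by
  intro ilosc n _
  unfold Spec_dzialanie
  exact dzialanie_eq_alt ilosc n
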